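-- pv_equiv track=rewrite | github.com/yiluzhou/watchtower | backend/services/intel.py | _model_available
-- ===== SOURCE A (Python) =====
-- def _model_available(requested: str, available: set[str]) -> bool:
--     normalized_requested = requested.strip().lower()
--     normalized_available = {a.strip().lower() for a in available if a}
--
--     if normalized_requested in normalized_available:
--         return True
--
--     if ":" not in normalized_requested and f"{normalized_requested}:latest" in normalized_available:
--         return True
--
--     # Only treat tag variants as interchangeable when the request omitted a tag.
--     if ":" not in normalized_requested:
--         req_base = normalized_requested.split(":", 1)[0]
--         return any(a.split(":", 1)[0] == req_base for a in normalized_available)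
--
--     return False
-- ===== SOURCE B (Python) =====
-- def _model_available(requested: str, available: set[str]) -> bool:
--     req = requested.strip().lower()
--     tagged = ":" in req
--     for a in available:
--         if not a:
--             continue
--         name = a.strip().lower()
--         if name == req if tagged else name.split(":", 1)[0] == req:
--             return True
--     return False
-- ===== Notes on version B (the rewrite author's own statement) =====
-- stated objective: alternative
-- what changed: A builds a normalized set and then runs three staged membership/scan checks over it; B never materializes any intermediate set: it fixes one per-element predicate from whether the request carries a tag and does a single streaming pass over the raw iterable with early exit.
import Mathlib
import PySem

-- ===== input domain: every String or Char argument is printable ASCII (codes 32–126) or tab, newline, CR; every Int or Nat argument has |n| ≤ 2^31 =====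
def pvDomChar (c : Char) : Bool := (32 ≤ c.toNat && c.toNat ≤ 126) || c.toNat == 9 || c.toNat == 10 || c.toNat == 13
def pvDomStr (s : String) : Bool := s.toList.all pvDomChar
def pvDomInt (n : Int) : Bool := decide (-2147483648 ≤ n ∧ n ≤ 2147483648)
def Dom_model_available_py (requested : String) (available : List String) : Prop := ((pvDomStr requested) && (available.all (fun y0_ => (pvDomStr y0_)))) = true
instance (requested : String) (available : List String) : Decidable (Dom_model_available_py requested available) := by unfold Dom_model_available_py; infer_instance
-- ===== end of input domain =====

-- B never builds A's normalized set: it fixes one per-element predicate from whether the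
-- request carries a tag and makes a single streaming pass over the raw list (alternative decomposition, same cost).

-- shared helper: a.split(":", 1)[0]  (both Pythons compute this expression)
def pySplitBase (s : String) : String :=
  ((PySem.Str.splitMax? s ":" 1).getD []).headD ""

-- ===== PORT A =====
def model_available_py (requested : String) (available : List String) : Bool :=
  let normalized_requested := PySem.Str.lower (PySem.Str.strip requested)
  let normalized_available : PySem.Set String :=
    PySem.Set.ofList ((available.filter (fun a => a ≠ "")).map
      (fun a => PySem.Str.lower (PySem.Str.strip a)))
  if PySem.Set.contains normalized_available normalized_requested then true
  else if (!PySem.Str.isIn ":" normalized_requested) &&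
          PySem.Set.contains normalized_available (normalized_requested ++ ":latest") then true
  else if !PySem.Str.isIn ":" normalized_requested then
    let req_base := pySplitBase normalized_requested
    normalized_available.any (fun a => pySplitBase a == req_base)
  else false

-- ===== PORT B =====
def model_available_py_alt (requested : String) (available : List String) : Bool :=
  let req := PySem.Str.lower (PySem.Str.strip requested)
  let tagged := PySem.Str.isIn ":" req
  available.any (fun a =>
    !(a == "") &&
      (let name := PySem.Str.lower (PySem.Str.strip a)
       if tagged then name == req else pySplitBase name == req))

-- ===== PRECONDITION & SPEC =====
def Spec_model_available_py (requested : String) (available : List String) (out : Bool) : Prop := out = model_available_py_alt requested available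
instance (requested : String) (available : List String) (out : Bool) : Decidable (Spec_model_available_py requested available out) := by unfold Spec_model_available_py; infer_instance

-- ===== CLAIM =====
def Claim_equal_model_available_py : Prop := ∀ (requested : String) (available : List String), Dom_model_available_py requested available → Spec_model_available_py requested available (model_available_py requested available)

-- ===== LEMMAS AND PROOFS =====

theorem go_msplit_zero (sep : List Char) (fuel : Nat) (l cur : List Char) (acc : List (List Char)) :
    PySem.Chars.splitOnMax.go sep fuel 0 l cur acc = ((cur.reverse ++ l) :: acc).reverse := by
  cases fuel with
  | zero => simp [PySem.Chars.splitOnMax.go]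
  | succ n => cases l <;> simp [PySem.Chars.splitOnMax.go]

theorem go_msplit_one (l : List Char) : ∀ (fuel : Nat) (cur : List Char) (acc : List (List Char)),
    l.length ≤ fuel →
    PySem.Chars.splitOnMax.go [':'] fuel 1 l cur acc =
      if ':' ∈ l then
        acc.reverse ++ [cur.reverse ++ l.takeWhile (fun c => !(c == ':')),
                        (l.dropWhile (fun c => !(c == ':'))).drop 1]
      else acc.reverse ++ [cur.reverse ++ l] := by
  induction l with
  | nil => intro fuel cur acc _; cases fuel <;> simp [PySem.Chars.splitOnMax.go]
  | cons c rest ih =>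
    intro fuel cur acc hfuel
    cases fuel with
    | zero => simp at hfuel
    | succ f =>
      by_cases hc : c = ':'
      · subst hc
        simp [PySem.Chars.splitOnMax.go, List.isPrefixOf, go_msplit_zero]
      · have hstep : PySem.Chars.splitOnMax.go [':'] (f+1) 1 (c :: rest) cur acc
            = PySem.Chars.splitOnMax.go [':'] f 1 rest (c :: cur) acc := by
          simp [PySem.Chars.splitOnMax.go, List.isPrefixOf, Ne.symm hc]
        rw [hstep, ih f (c :: cur) acc (by simpa using hfuel)]
        by_cases hm : ':' ∈ rest <;> simp [hm, hc, Ne.symm hc]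

theorem takeWhile_ne_colon_eq {l : List Char} (h : ':' ∉ l) :
    l.takeWhile (fun c => !(c == ':')) = l := by
  refine List.takeWhile_eq_self_iff.mpr ?_
  intro c hc
  simp only [Bool.not_eq_eq_eq_not, Bool.not_true, beq_eq_false_iff_ne, ne_eq]
  rintro rfl; exact h hc

theorem takeWhile_append_colon (l t : List Char) (h : ':' ∉ l) :
    (l ++ ':' :: t).takeWhile (fun c => !(c == ':')) = l := by
  induction l with
  | nil => simp
  | cons a l ih =>
    have ha : a ≠ ':' := fun e => h (by simp [e])
    simp only [List.cons_append, List.takeWhile_cons]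
    simp [ha, ih (fun hm => h (List.mem_cons_of_mem _ hm))]

theorem pySplitBase_eq (s : String) :
    pySplitBase s = String.ofList (s.toList.takeWhile (fun c => !(c == ':'))) := by
  unfold pySplitBase
  have h1 : PySem.Str.splitMax? s ":" 1 =
      Option.map (fun x => List.map String.ofList x)
        (PySem.Chars.splitMax? s.toList [':'] 1) := rfl
  have h2 : PySem.Chars.splitMax? s.toList [':'] 1 =
      some (PySem.Chars.splitOnMax s.toList [':'] 1) := by
    simp [PySem.Chars.splitMax?]
  have h3 : PySem.Chars.splitOnMax s.toList [':'] 1 =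
      PySem.Chars.splitOnMax.go [':'] (s.toList.length + 1) 1 s.toList [] [] := by
    simp [PySem.Chars.splitOnMax]
  rw [h1, h2]
  simp only [Option.map_some, Option.getD_some, h3,
    go_msplit_one s.toList (s.toList.length + 1) [] [] (by omega)]
  by_cases hm : ':' ∈ s.toList
  · simp [hm]
  · simp [hm, takeWhile_ne_colon_eq hm, String.ofList_toList]

theorem not_colon_of_not_isIn {s : String} (h : PySem.Str.isIn ":" s = false) :
    ':' ∉ s.toList := by
  intro hmem
  obtain ⟨pre, suf, hps⟩ := List.append_of_mem hmem
  have hinf : [':'] <:+: s.toList := ⟨pre, suf, by rw [hps]; simp⟩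
  have hC : PySem.Chars.isIn [':'] s.toList = false := by simpa using h
  have h2 : PySem.Str.isIn ":" s = true := (PySem.Str.isIn_iff_infix ":" s).mpr (by simpa using hinf)
  simp [hC] at h2

theorem base_of_no_colon {s : String} (h : ':' ∉ s.toList) : pySplitBase s = s := by
  rw [pySplitBase_eq, takeWhile_ne_colon_eq h, String.ofList_toList]

theorem base_latest {s : String} (h : ':' ∉ s.toList) :
    pySplitBase (s ++ ":latest") = s := by
  rw [pySplitBase_eq]
  have hl : (s ++ ":latest").toList = s.toList ++ (':' :: "latest".toList) := by simp
  rw [hl, takeWhile_append_colon _ _ h, String.ofList_toList]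

-- any over the deduplicated set equals any over the underlying list
theorem set_any_eq_list_any (lst : List String) (p : String → Bool) :
    (PySem.Set.ofList lst).any p = lst.any p := by
  rw [Bool.eq_iff_iff]
  simp only [List.any_eq_true]
  constructor
  · rintro ⟨x, hx, hp⟩
    exact ⟨x, (PySem.Set.mem_ofList lst x).mp hx, hp⟩
  · rintro ⟨x, hx, hp⟩
    exact ⟨x, (PySem.Set.mem_ofList lst x).mpr hx, hp⟩

-- B's streaming any over the raw list equals any over A's normalized list
theorem any_raw_eq_any_norm (available : List String) (p : String → Bool) :
    (available.any (fun a => (!(a == "")) && p (PySem.Str.lower (PySem.Str.strip a)))) =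
      ((available.filter (fun a => a ≠ "")).map
        (fun a => PySem.Str.lower (PySem.Str.strip a))).any p := by
  induction available with
  | nil => rfl
  | cons a rest ih =>
    by_cases ha : a = ""
    · subst ha; simpa using ih
    · have hb' : (a == "") = false := beq_eq_false_iff_ne.mpr ha
      simp [hb', ha, ih]

-- ===== VERDICT =====
theorem model_available_py_spec : Claim_equal_model_available_py := by
  intro requested available _
  unfold Spec_model_available_py model_available_py model_available_py_alt
  set nr := PySem.Str.lower (PySem.Str.strip requested) with hnr
  set lst := (available.filter (fun a => a ≠ "")).map
      (fun a => PySem.Str.lower (PySem.Str.strip a)) with hlst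
  by_cases hc : PySem.Str.isIn ":" nr
  · have hcC : PySem.Chars.isIn [':'] nr.toList = true := by simpa using hc
    simp only [hc, if_true]
    rw [any_raw_eq_any_norm available (fun name => name == nr), ← hlst]
    rw [Bool.eq_iff_iff]
    by_cases hA : nr ∈ lst
    · simp [PySem.Set.contains, hA, List.any_eq_true,
        (PySem.Set.mem_ofList lst nr).mpr hA]
    · have hA' : nr ∉ PySem.Set.ofList lst := fun h => hA ((PySem.Set.mem_ofList lst nr).mp h)
      simp only [PySem.Set.contains]
      simp [hA', hA, List.any_eq_true]
  · have hb : (PySem.Str.isIn ":" nr) = false := by simpa using hc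
    have hnc : ':' ∉ nr.toList := not_colon_of_not_isIn hb
    have hbC : PySem.Chars.isIn [':'] nr.toList = false := by simpa using hb
    simp only [hb, Bool.false_eq_true, if_false]
    rw [any_raw_eq_any_norm available (fun name => pySplitBase name == nr), ← hlst,
      ← set_any_eq_list_any lst (fun name => pySplitBase name == nr)]
    simp only [base_of_no_colon hnc]
    by_cases hA : nr ∈ lst
    · have hany : (List.any (PySem.Set.ofList lst) fun a => pySplitBase a == nr) = true :=
        List.any_eq_true.mpr ⟨nr, (PySem.Set.mem_ofList lst nr).mpr hA,
          by simp [base_of_no_colon hnc]⟩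
      simp [hA, hany]
    · by_cases hB : nr ++ ":latest" ∈ lst
      · have hany : (List.any (PySem.Set.ofList lst) fun a => pySplitBase a == nr) = true :=
          List.any_eq_true.mpr ⟨nr ++ ":latest", (PySem.Set.mem_ofList lst _).mpr hB,
            by simp [base_latest hnc]⟩
        simp [hB, hany]
      · simp [hA, hB]
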